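-- pv_equiv track=rewrite | github.com/VojtaMarek/TrainingOfCode | Codewars/short_msg.py | shortener0
-- ===== SOURCE A (Python) =====
-- def shortener0(message):
--
--     # spaces = message.count(" ")
--     # msg_nochange = ""
--     # msg_words_list = []
--     # lst = []
--     ch_left = len(message) - 160
--     if ch_left <= 0:
--         return message  # too short to change
--
--     # if (len(message)-spaces) > 160:     #too long, change all
--     #    msg_nochange = ""                   #str
--     #    msg_words_list = message.split()     #list
--     # else:                               #change partly
--     # out = (len(message)-160)
--
--     message = message.rsplit(" ", ch_left)  # list
--     msg_nochange = "".join(message[0])  # str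
--     msg_words_list = message[1:]  # list
--
--     # lst = msg_words_list                     #list needed HERE!
--     # x = 0
--     for i, word in enumerate(msg_words_list):
--         word = msg_words_list[i] = word.title()
--         # x += 1
--     # msg_words_list = "".join(msg_words_list)
--     return msg_nochange + "".join(msg_words_list)
--
--     """
--     #Josef Skladanka10:57
--     x = 0
--     for i in lst:
--         word = lst[x]
--         word = word[0].upper() + word[1:]
--         lst[x] = word
--         x += 1
--
--     #Josef Skladanka11:00
--     for x, word in enumerate(lst):
--         lst[x] =  word[0].upper() + word[1:]
--
--     #Josef Skladanka11:03
--     lst = [word[0].upper() + word[1:] for word in lst]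
--
--
--     #Josef Skladanka11:04
--     lst = [word.title() for word in lst]
-- """
-- ===== SOURCE B (Python) =====
-- def shortener0(message):
--     # One forward character pass: keep the first `cut` spaces and everything up to
--     # the (cut+1)-th space verbatim; drop every later space and title-case the rest
--     # in place (upper after a non-letter, lower after a letter).
--     ch_left = len(message) - 160
--     if ch_left <= 0:
--         return message
--     spaces = message.count(' ')
--     cut = spaces - min(ch_left, spaces)   # number of spaces that survive
--     out = []
--     j = 0
--     prev_alpha = False
--     for c in message:
--         if c == ' ':
--             j += 1
--             if j <= cut:
--                 out.append(c)
--         elif j > cut: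
--             out.append(c.lower() if prev_alpha else c.upper())
--         else:
--             out.append(c)
--         prev_alpha = c.isalpha()
--     return ''.join(out)
-- ===== Notes on version B (the rewrite author's own statement) =====
-- stated objective: alternative
-- what changed: Replaces rsplit-into-a-word-list plus a per-word title() loop and joins by a single forward character pass that counts spaces, drops the trailing ones and title-cases characters in place using only the previous character's alpha-ness.
import Mathlib
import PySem

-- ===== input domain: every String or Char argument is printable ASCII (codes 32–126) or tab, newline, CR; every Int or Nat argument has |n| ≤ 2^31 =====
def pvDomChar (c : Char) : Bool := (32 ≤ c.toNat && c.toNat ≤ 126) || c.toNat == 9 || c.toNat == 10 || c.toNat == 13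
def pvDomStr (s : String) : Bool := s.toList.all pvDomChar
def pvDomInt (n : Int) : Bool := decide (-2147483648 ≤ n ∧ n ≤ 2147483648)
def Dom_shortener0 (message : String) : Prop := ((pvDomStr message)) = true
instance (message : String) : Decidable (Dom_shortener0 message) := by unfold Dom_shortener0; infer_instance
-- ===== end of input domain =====

-- B replaces A's rsplit-into-words + per-word title() loop + joins by one forward
-- character pass (alternative decomposition, same O(n) cost).

-- ===== PORT A =====
-- str.title() has no PySem primitive: hand port, exact on the ASCII domain
-- (a letter is uppercased iff the previous char is not a letter, else lowercased;
-- on ASCII 'cased' = letter).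
def pvTitleAux : Bool → List Char → List Char
  | _, [] => []
  | prev, c :: rest =>
    if PySem.Chars.isalpha c then
      (if prev then PySem.Chars.lowerChar c else PySem.Chars.upperChar c) :: pvTitleAux true rest
    else c :: pvTitleAux false rest

def pvTitle (cs : List Char) : List Char := pvTitleAux false cs

-- str.split(" ") has no PySem primitive: hand port, exact (keeps empty pieces,
-- "" gives [""]).
def pvSplitSp (cs : List Char) : List (List Char) :=
  cs.foldr (fun c ps => if c = ' ' then [] :: ps else (c :: ps.headD []) :: ps.tail) [[]]

-- str.rsplit(" ", n) for n ≥ 0 has no PySem primitive: hand port, exact — every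
-- split is at a space, so rsplit keeps the last n pieces of the full split and
-- rejoins the front pieces with " ".
def pvRsplitSp (cs : List Char) (n : Nat) : List (List Char) :=
  let ps := pvSplitSp cs
  if ps.length ≤ n + 1 then ps
  else PySem.Chars.join [' '] (ps.take (ps.length - n)) :: ps.drop (ps.length - n)

def shortener0 (message : String) : String :=
  let chLeft : Int := PySem.Str.len message - 160
  if chLeft ≤ 0 then message
  else
    let parts := pvRsplitSp message.toList chLeft.toNat
    let msgNochange := PySem.Chars.join [] ((parts.headD []).map fun c => [c])
    let msgWordsList := (parts.drop 1).map pvTitle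
    String.mk (msgNochange ++ PySem.Chars.join [] msgWordsList)

-- ===== PORT B =====
-- one step of B's single forward pass (state: output, spaces seen, prev char is a letter)
def pvStepB (cut : Int) : (List Char × Int × Bool) → Char → (List Char × Int × Bool)
  | (out, j, prevAlpha), c =>
    if c = ' ' then
      (if j + 1 ≤ cut then out ++ [c] else out, j + 1, PySem.Chars.isalpha c)
    else if cut < j then
      (out ++ [if prevAlpha then PySem.Chars.lowerChar c else PySem.Chars.upperChar c], j,
        PySem.Chars.isalpha c)
    else (out ++ [c], j, PySem.Chars.isalpha c)

def shortener0_alt (message : String) : String :=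
  let chLeft : Int := PySem.Str.len message - 160
  if chLeft ≤ 0 then message
  else
    let spaces : Int := (PySem.Str.count message " " : Int)
    let cut : Int := spaces - min chLeft spaces
    String.mk (message.toList.foldl (pvStepB cut) ([], 0, false)).1

-- ===== PRECONDITION & SPEC =====
def Spec_shortener0 (message : String) (out : String) : Prop := out = shortener0_alt message
instance (message : String) (out : String) : Decidable (Spec_shortener0 message out) := by unfold Spec_shortener0; infer_instance

-- ===== CLAIM (what is proved, stated in full; the proofs are below) =====
def Claim_equal_shortener0 : Prop := ∀ (message : String), Dom_shortener0 message → Spec_shortener0 message (shortener0 message)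

-- ===== LEMMAS AND PROOFS =====

-- Python's str.count(" ") is List.count ' '
lemma pv_countgo_space : ∀ (fuel : Nat) (l : List Char) (acc : Nat), l.length ≤ fuel →
    PySem.Chars.count.go [' '] fuel l acc = acc + l.count ' ' := by
  intro fuel
  induction fuel with
  | zero =>
    intro l acc h
    have hl : l = [] := List.eq_nil_of_length_eq_zero (by omega)
    subst hl; simp [PySem.Chars.count.go]
  | succ n ih =>
    intro l acc h
    cases l with
    | nil => simp [PySem.Chars.count.go]
    | cons c t =>
      have ht : t.length ≤ n := by simp at h; omega
      by_cases hc : c = ' '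
      · subst hc
        rw [show PySem.Chars.count.go [' '] (n + 1) (' ' :: t) acc
            = PySem.Chars.count.go [' '] n t (acc + 1) from by
          simp [PySem.Chars.count.go, List.isPrefixOf]]
        rw [ih t (acc + 1) ht]
        simp [List.count_cons]
        omega
      · rw [show PySem.Chars.count.go [' '] (n + 1) (c :: t) acc
            = PySem.Chars.count.go [' '] n t acc from by
          simp [PySem.Chars.count.go, List.isPrefixOf, Ne.symm hc]]
        rw [ih t acc ht]
        simp [List.count_cons, hc]

lemma pv_count_space (s : String) : PySem.Str.count s " " = s.toList.count ' ' := by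
  rw [PySem.Str.count_eq]
  show PySem.Chars.count s.toList [' '] = _
  unfold PySem.Chars.count
  rw [if_neg (by simp)]
  rw [pv_countgo_space s.toList.length s.toList 0 le_rfl]
  omega

-- pvSplitSp basics
lemma pv_splitSp_cons (c : Char) (rest : List Char) :
    pvSplitSp (c :: rest) = if c = ' ' then [] :: pvSplitSp rest
      else (c :: (pvSplitSp rest).headD []) :: (pvSplitSp rest).tail := rfl

lemma pv_splitSp_length : ∀ cs : List Char, (pvSplitSp cs).length = cs.count ' ' + 1 := by
  intro cs
  induction cs with
  | nil => rfl
  | cons c rest ih =>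
    rw [pv_splitSp_cons]
    by_cases hc : c = ' ' <;> simp [hc, List.count_cons, List.length_tail] <;> omega

lemma pv_splitSp_ne_nil (cs : List Char) : ∃ q rest', pvSplitSp cs = q :: rest' := by
  have hlen := pv_splitSp_length cs
  cases h : pvSplitSp cs with
  | nil => rw [h] at hlen; simp at hlen
  | cons q rest' => exact ⟨q, rest', rfl⟩

lemma pv_splitSp_join : ∀ cs : List Char, PySem.Chars.join [' '] (pvSplitSp cs) = cs := by
  intro cs
  induction cs with
  | nil => simp [pvSplitSp, PySem.Chars.join_singleton]
  | cons c rest ih =>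
    obtain ⟨q, rest', hps⟩ := pv_splitSp_ne_nil rest
    rw [pv_splitSp_cons, hps]
    rw [hps] at ih
    simp only [List.headD_cons, List.tail_cons]
    by_cases hc : c = ' '
    · rw [if_pos hc, PySem.Chars.join_cons_cons, hc]
      simpa using ih
    · rw [if_neg hc]
      cases rest' with
      | nil =>
        rw [PySem.Chars.join_singleton] at ih ⊢
        simp [ih]
      | cons r rs =>
        rw [PySem.Chars.join_cons_cons] at ih ⊢
        simp_all
    
lemma pv_splitSp_no_space : ∀ (cs : List Char) (p : List Char), p ∈ pvSplitSp cs → ' ' ∉ p := by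
  intro cs
  induction cs with
  | nil =>
    intro p hp
    have : p = [] := by simpa [pvSplitSp] using hp
    simp [this]
  | cons c rest ih =>
    intro p hp
    obtain ⟨q, rest', hps⟩ := pv_splitSp_ne_nil rest
    rw [pv_splitSp_cons, hps] at hp
    simp only [List.headD_cons, List.tail_cons] at hp
    by_cases hc : c = ' '
    · rw [if_pos hc] at hp
      rcases List.mem_cons.mp hp with h | h
      · subst h; simp
      · exact ih p (by rw [hps]; exact h)
    · rw [if_neg hc] at hp
      rcases List.mem_cons.mp hp with h | h
      · subst h
        intro hmem
        rcases List.mem_cons.mp hmem with h' | h'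
        · exact hc h'.symm
        · exact ih q (by rw [hps]; exact List.mem_cons_self ..) h'
      · exact ih p (by rw [hps]; exact List.mem_cons_of_mem _ h)

lemma pv_join_count : ∀ qs : List (List Char), (∀ p ∈ qs, ' ' ∉ p) →
    (PySem.Chars.join [' '] qs).count ' ' = qs.length - 1 := by
  intro qs
  induction qs with
  | nil => intro _; simp [PySem.Chars.join_nil]
  | cons p qs' ih =>
    intro h
    cases qs' with
    | nil =>
      rw [PySem.Chars.join_singleton]
      simp [List.count_eq_zero.mpr (h p (by simp))]
    | cons q rs =>
      rw [PySem.Chars.join_cons_cons]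
      have h1 : (p.count ' ') = 0 := List.count_eq_zero.mpr (h p (by simp))
      have h2 := ih (fun x hx => h x (List.mem_cons_of_mem _ hx))
      simp [List.count_append, h1, h2]

lemma pv_join_append : ∀ (qs1 qs2 : List (List Char)), qs1 ≠ [] → qs2 ≠ [] →
    PySem.Chars.join [' '] (qs1 ++ qs2) =
      PySem.Chars.join [' '] qs1 ++ ' ' :: PySem.Chars.join [' '] qs2 := by
  intro qs1
  induction qs1 with
  | nil => intro qs2 h _; exact absurd rfl h
  | cons p qs1' ih =>
    intro qs2 _ h2
    cases qs1' with
    | nil =>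
      obtain ⟨q, rs, rfl⟩ := List.exists_cons_of_ne_nil h2
      rw [List.singleton_append, PySem.Chars.join_cons_cons, PySem.Chars.join_singleton]
      simp
    | cons p' qs1'' =>
      rw [List.cons_append, List.cons_append, PySem.Chars.join_cons_cons,
        PySem.Chars.join_cons_cons, ← List.cons_append, ih qs2 (by simp) h2]
      simp

lemma pv_join_nil_cons (x : List Char) (xs : List (List Char)) :
    PySem.Chars.join [] (x :: xs) = x ++ PySem.Chars.join [] xs := by
  cases xs with
  | nil => simp [PySem.Chars.join_singleton, PySem.Chars.join_nil]
  | cons y ys => rw [PySem.Chars.join_cons_cons]; simp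

-- last-letter state of the pass / title() with the spaces dropped (proof-only helpers)
def pvLastA (a : Bool) (xs : List Char) : Bool :=
  xs.foldl (fun _ c => PySem.Chars.isalpha c) a

def pvTDrop : Bool → List Char → List Char
  | _, [] => []
  | a, c :: rest =>
    if c = ' ' then pvTDrop false rest
    else (if a then PySem.Chars.lowerChar c else PySem.Chars.upperChar c) ::
      pvTDrop (PySem.Chars.isalpha c) rest

lemma pv_lastA_cons (a : Bool) (c : Char) (t : List Char) :
    pvLastA a (c :: t) = pvLastA (PySem.Chars.isalpha c) t := rfl

lemma pv_nonalpha_case (c : Char) (h : PySem.Chars.isalpha c = false) (a : Bool) :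
    (if a then PySem.Chars.lowerChar c else PySem.Chars.upperChar c) = c := by
  simp only [PySem.Chars.isalpha, Bool.or_eq_false_iff] at h
  cases a <;> simp [PySem.Chars.lowerChar, PySem.Chars.upperChar, h.1, h.2]

lemma pv_tdrop_eq_title : ∀ (xs : List Char) (a : Bool), ' ' ∉ xs →
    pvTDrop a xs = pvTitleAux a xs := by
  intro xs
  induction xs with
  | nil => intro a _; rfl
  | cons c t ih =>
    intro a h
    have hc : c ≠ ' ' := fun hh => h (by simp [hh])
    have ht : ' ' ∉ t := fun hh => h (by simp [hh])
    rw [pvTDrop, pvTitleAux]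
    rw [if_neg hc]
    by_cases ha : PySem.Chars.isalpha c
    · rw [if_pos ha, ha, ih true ht]
    · rw [if_neg ha, pv_nonalpha_case c (by simpa using ha) a, (by simpa using ha :
        PySem.Chars.isalpha c = false), ih false ht]

lemma pv_tdrop_append_space : ∀ (xs ys : List Char) (a : Bool),
    pvTDrop a (xs ++ ' ' :: ys) = pvTDrop a xs ++ pvTDrop false ys := by
  intro xs
  induction xs with
  | nil => intro ys a; simp [pvTDrop]
  | cons c t ih =>
    intro ys a
    rw [List.cons_append, pvTDrop, pvTDrop]
    by_cases hc : c = ' '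
    · rw [if_pos hc, if_pos hc, ih]
    · rw [if_neg hc, if_neg hc, ih]
      simp

lemma pv_tdrop_join : ∀ qs : List (List Char), (∀ p ∈ qs, ' ' ∉ p) →
    pvTDrop false (PySem.Chars.join [' '] qs) = PySem.Chars.join [] (qs.map pvTitle) := by
  intro qs
  induction qs with
  | nil => intro _; simp [PySem.Chars.join_nil, pvTDrop]
  | cons p qs' ih =>
    intro h
    cases qs' with
    | nil =>
      rw [PySem.Chars.join_singleton]
      simp only [List.map_cons, List.map_nil, PySem.Chars.join_singleton]
      exact pv_tdrop_eq_title p false (h p (by simp))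
    | cons q rs =>
      rw [PySem.Chars.join_cons_cons]
      have hsp : p ++ [' '] ++ PySem.Chars.join [' '] (q :: rs)
          = p ++ ' ' :: PySem.Chars.join [' '] (q :: rs) := by simp
      rw [hsp, pv_tdrop_append_space, pv_tdrop_eq_title p false (h p (by simp)),
        ih (fun x hx => h x (List.mem_cons_of_mem _ hx))]
      simp [pvTitle, pv_join_nil_cons]

lemma pv_isalpha_space : PySem.Chars.isalpha ' ' = false := by decide

lemma pv_foldB_head (cut : Int) : ∀ (xs out : List Char) (j : Int) (a : Bool),
    j + (xs.count ' ' : Int) ≤ cut →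
    xs.foldl (pvStepB cut) (out, j, a) = (out ++ xs, j + (xs.count ' ' : Int), pvLastA a xs) := by
  intro xs
  induction xs with
  | nil => intro out j a _; simp [pvLastA]
  | cons c t ih =>
    intro out j a h
    rw [List.foldl_cons, pv_lastA_cons]
    by_cases hc : c = ' '
    · subst hc
      have hcnt : ((' ' :: t).count ' ' : Int) = (t.count ' ' : Int) + 1 := by
        simp [List.count_cons]
      rw [hcnt] at h ⊢
      have hle : j + 1 ≤ cut := by omega
      have hstep : pvStepB cut (out, j, a) ' '
          = (out ++ [' '], j + 1, PySem.Chars.isalpha ' ') := by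
        simp [pvStepB, hle]
      rw [hstep, pv_isalpha_space, ih (out ++ [' ']) (j + 1) false (by omega)]
      simp
      omega
    · have hcnt : ((c :: t).count ' ' : Int) = (t.count ' ' : Int) := by
        simp [List.count_cons, hc]
      rw [hcnt] at h ⊢
      have hnlt : ¬ cut < j := by omega
      have hstep : pvStepB cut (out, j, a) c = (out ++ [c], j, PySem.Chars.isalpha c) := by
        simp [pvStepB, hc, hnlt]
      rw [hstep, ih (out ++ [c]) j _ (by omega)]
      simp

lemma pv_foldB_tail (cut : Int) : ∀ (xs out : List Char) (j : Int) (a : Bool), cut < j →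
    xs.foldl (pvStepB cut) (out, j, a)
      = (out ++ pvTDrop a xs, j + (xs.count ' ' : Int), pvLastA a xs) := by
  intro xs
  induction xs with
  | nil => intro out j a _; simp [pvLastA, pvTDrop]
  | cons c t ih =>
    intro out j a h
    rw [List.foldl_cons, pv_lastA_cons, pvTDrop]
    by_cases hc : c = ' '
    · subst hc
      have hnle : ¬ j + 1 ≤ cut := by omega
      have hstep : pvStepB cut (out, j, a) ' ' = (out, j + 1, PySem.Chars.isalpha ' ') := by
        simp [pvStepB, hnle]
      rw [hstep, pv_isalpha_space, ih out (j + 1) false (by omega), if_pos rfl]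
      simp [List.count_cons]
      omega
    · have hstep : pvStepB cut (out, j, a) c
        = (out ++ [if a then PySem.Chars.lowerChar c else PySem.Chars.upperChar c], j,
            PySem.Chars.isalpha c) := by
        simp [pvStepB, hc, h]
      rw [hstep, ih _ j _ h, if_neg hc]
      simp [List.count_cons, hc]

-- the common normal form of both sides, in the long-message branch
lemma pv_main (cs : List Char) (n : Nat) (hn : 1 ≤ n) :
    (PySem.Chars.join [] (((pvRsplitSp cs n).headD []).map fun c => [c])
        ++ PySem.Chars.join [] (((pvRsplitSp cs n).drop 1).map pvTitle))
      = (cs.foldl (pvStepB ((cs.count ' ' : Int) - min (n : Int) (cs.count ' ')))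
          ([], 0, false)).1 := by
  have hlen := pv_splitSp_length cs
  set S := cs.count ' ' with hS
  set t := min n S with ht
  have hcast : ((S : Int) - min (n : Int) (S : Int)) = ((S - t : Nat) : Int) := by
    rw [ht, ← Nat.cast_min]
    omega
  set cutN := S - t with hcutN
  obtain ⟨p0, rest, hps⟩ := pv_splitSp_ne_nil cs
  -- A's branch result in normal form
  have hA : PySem.Chars.join [] (((pvRsplitSp cs n).headD []).map fun c => [c])
        ++ PySem.Chars.join [] (((pvRsplitSp cs n).drop 1).map pvTitle)
      = PySem.Chars.join [' '] ((pvSplitSp cs).take (cutN + 1))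
        ++ PySem.Chars.join [] (((pvSplitSp cs).drop (cutN + 1)).map pvTitle) := by
    unfold pvRsplitSp
    by_cases hc : (pvSplitSp cs).length ≤ n + 1
    · have htS : t = S := min_eq_right (by omega)
      have hc0 : cutN = 0 := by omega
      rw [if_pos hc, hc0, hps]
      simp [PySem.Chars.join_nil_singletons, PySem.Chars.join_singleton]
    · have htn : t = n := min_eq_left (by omega)
      have hln : (pvSplitSp cs).length - n = cutN + 1 := by omega
      rw [if_neg hc, hln]
      simp [PySem.Chars.join_nil_singletons]
  rw [hA, hcast]
  by_cases hS0 : S = 0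
  · -- no spaces: everything is copied verbatim
    have hc0 : cutN = 0 := by omega
    have hrest : rest = [] := by
      rw [hps] at hlen; simpa [hS0] using hlen
    have hp0 : p0 = cs := by
      have hj := pv_splitSp_join cs
      rwa [hps, hrest, PySem.Chars.join_singleton] at hj
    rw [pv_foldB_head _ cs [] 0 false (by simp [← hS, hS0, hc0])]
    rw [hps, hrest, hc0]
    simp [PySem.Chars.join_singleton, PySem.Chars.join_nil, hp0]
  · -- at least one space is removed: head phase, the cut space, tail phase
    have ht1 : 1 ≤ t := by
      rw [ht]; exact le_min hn (by omega)
    have hcS : cutN < S := by omega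
    set qs1 := (pvSplitSp cs).take (cutN + 1) with hqs1
    set qs2 := (pvSplitSp cs).drop (cutN + 1) with hqs2
    have hq1len : qs1.length = cutN + 1 := by
      rw [hqs1, List.length_take]; omega
    have hq2len : qs2.length = S - cutN := by
      rw [hqs2, List.length_drop]; omega
    have hq1ne : qs1 ≠ [] := by
      intro hnil; rw [hnil] at hq1len; simp at hq1len
    have hq2ne : qs2 ≠ [] := by
      intro hnil; rw [hnil] at hq2len; simp at hq2len; omega
    have hns1 : ∀ p ∈ qs1, ' ' ∉ p := fun p hp =>
      pv_splitSp_no_space cs p (List.mem_of_mem_take hp)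
    have hns2 : ∀ p ∈ qs2, ' ' ∉ p := fun p hp =>
      pv_splitSp_no_space cs p (List.mem_of_mem_drop hp)
    have hsplit : cs = PySem.Chars.join [' '] qs1 ++ ' ' :: PySem.Chars.join [' '] qs2 := by
      conv_lhs => rw [← pv_splitSp_join cs, ← List.take_append_drop (cutN + 1) (pvSplitSp cs)]
      exact pv_join_append qs1 qs2 hq1ne hq2ne
    have hcnt1 : ((PySem.Chars.join [' '] qs1).count ' ' : Int) = (cutN : Int) := by
      rw [pv_join_count qs1 hns1, hq1len]
      simp
    conv_rhs => rw [hsplit]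
    rw [List.foldl_append]
    rw [pv_foldB_head _ _ [] 0 false (by rw [hcnt1]; omega)]
    simp only [List.nil_append, zero_add, hcnt1]
    rw [List.foldl_cons]
    have hstep : pvStepB ((cutN : Nat) : Int)
        (PySem.Chars.join [' '] qs1, (cutN : Int), pvLastA false (PySem.Chars.join [' '] qs1)) ' '
        = (PySem.Chars.join [' '] qs1, (cutN : Int) + 1, false) := by
      have hnle : ¬ ((cutN : Int) + 1 ≤ (cutN : Int)) := by omega
      simp [pvStepB, hnle, pv_isalpha_space]
    rw [hstep, pv_foldB_tail _ _ _ _ false (by omega), pv_tdrop_join qs2 hns2]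

-- ===== VERDICT (by name: the statement is the Claim_ definition above) =====
theorem shortener0_spec : Claim_equal_shortener0 := by
  intro message _hdom
  unfold Spec_shortener0
  simp only [shortener0, shortener0_alt, PySem.Str.len_eq, pv_count_space]
  by_cases hl : ((message.toList.length : Nat) : Int) - 160 ≤ 0
  · rw [if_pos hl, if_pos hl]
  · rw [if_neg hl, if_neg hl]
    have hn1 : 1 ≤ (((message.toList.length : Nat) : Int) - 160).toNat := by omega
    have hcast : (((message.toList.length : Nat) : Int) - 160)
        = (((((message.toList.length : Nat) : Int) - 160).toNat : Nat) : Int) := by omega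
    rw [hcast]
    simp only [Int.toNat_natCast]
    congr 1
    exact pv_main message.toList ((((message.toList.length : Nat) : Int) - 160).toNat) hn1
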